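-- pv_equiv track=rewrite | github.com/scartill/tagth | src/tagth/tagth.py | _resolve_internal
-- ===== SOURCE A (Python) =====
-- ANYONE_PRINCIPAL = 'anyone'
--
-- FULL_ACCESS_ACTION = 'all'
--
-- ROOT_PRINCIPAL = 'root'
--
-- VOID_PRINCIPAL = 'void'
--
-- def _resolve_internal(principal: list[str], resource: list[tuple[str, str]]) -> set[str]:
--     actions = set()
--
--     for pr_tag in principal:
--         if pr_tag == ROOT_PRINCIPAL:
--             actions.add(FULL_ACCESS_ACTION)
--
--     if not resource:
--         return actions
--
--     for (res_tag, action) in resource: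
--         if res_tag == ANYONE_PRINCIPAL:
--             actions.add(action)
--
--     for pr_tag in principal:
--         if pr_tag == VOID_PRINCIPAL:
--             continue
--
--         for (res_tag, action) in resource:
--             if res_tag.startswith(pr_tag):
--                 actions.add(action)
--
--     return actions
-- ===== SOURCE B (Python) =====
-- ANYONE_PRINCIPAL = 'anyone'
-- FULL_ACCESS_ACTION = 'all'
-- ROOT_PRINCIPAL = 'root'
-- VOID_PRINCIPAL = 'void'
--
-- def _resolve_internal(principal: list[str], resource: list[tuple[str, str]]) -> set[str]:
--     # Build a prefix index (every prefix of every resource tag -> its actions) once,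
--     # then answer each principal tag by a single dict lookup: no nested startswith scan.
--     cand = [FULL_ACCESS_ACTION] if ROOT_PRINCIPAL in principal else []
--     if not resource:
--         return set(cand)
--     exact = {}
--     index = {}
--     for (res_tag, action) in resource:
--         exact.setdefault(res_tag, []).append(action)
--         for k in range(len(res_tag) + 1):
--             index.setdefault(res_tag[:k], []).append(action)
--     cand += exact.get(ANYONE_PRINCIPAL, [])
--     for pr_tag in principal:
--         if pr_tag != VOID_PRINCIPAL:
--             cand += index.get(pr_tag, [])
--     return set(cand)
-- ===== Notes on version B (the rewrite author's own statement) =====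
-- stated objective: faster
-- what changed: Replaces A's nested loop (every principal tag tested with startswith against every resource tag) by a prefix index over the resource tags built in one pass (every prefix of a tag maps to its actions, plus an exact-tag dict for the 'anyone' pass); each principal tag is then answered by a single dict lookup.
import Mathlib
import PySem

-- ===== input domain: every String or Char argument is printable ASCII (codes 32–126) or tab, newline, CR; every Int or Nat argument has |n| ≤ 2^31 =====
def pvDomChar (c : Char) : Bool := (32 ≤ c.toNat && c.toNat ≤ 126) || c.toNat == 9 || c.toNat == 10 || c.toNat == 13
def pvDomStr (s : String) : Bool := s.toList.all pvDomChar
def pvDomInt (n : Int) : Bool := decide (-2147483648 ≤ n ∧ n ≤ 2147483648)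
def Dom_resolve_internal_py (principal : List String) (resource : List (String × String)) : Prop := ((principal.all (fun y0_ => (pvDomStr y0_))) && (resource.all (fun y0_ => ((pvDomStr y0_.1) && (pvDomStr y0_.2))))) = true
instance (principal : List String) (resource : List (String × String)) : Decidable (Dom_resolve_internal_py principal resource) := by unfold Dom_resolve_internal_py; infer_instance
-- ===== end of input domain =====

-- B replaces A's nested startswith scan (every principal tag against every resource tag) by a
-- prefix index built once over the resource tags — each principal tag is then answered by a single
-- dict lookup — plus an exact-tag dict for the 'anyone' pass.

-- ===== PORT A =====
def resolve_internal_py (principal : List String) (resource : List (String × String)) : List String :=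
  let actions : PySem.Set String :=
    principal.foldl (fun acc pr_tag =>
      if pr_tag == "root" then PySem.Set.add acc "all" else acc) PySem.Set.empty
  if resource.isEmpty then actions
  else
    let actions := resource.foldl (fun acc p =>
      if p.1 == "anyone" then PySem.Set.add acc p.2 else acc) actions
    let actions := principal.foldl (fun acc pr_tag =>
      if pr_tag == "void" then acc
      else resource.foldl (fun acc2 p =>
        if PySem.Str.startswith p.1 pr_tag then PySem.Set.add acc2 p.2 else acc2) acc) actions
    actions

-- ===== PORT B =====
def resolve_internal_py_alt (principal : List String) (resource : List (String × String)) : List String :=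
  let cand : List String := if principal.contains "root" then ["all"] else []
  if resource.isEmpty then PySem.Set.ofList cand
  else
    -- one pass over resource builds both dicts: exact tag -> actions, and every prefix of a tag -> actions
    let ei : PySem.Dict String (List String) × PySem.Dict String (List String) :=
      resource.foldl (fun di p =>
        (di.1.modify p.1 [] (· ++ [p.2]),
         (PySem.List.pyRange 0 (PySem.Str.len p.1 + 1) 1).foldl
           (fun d2 k => d2.modify (PySem.Str.slice p.1 none (some k)) [] (· ++ [p.2])) di.2))
        (PySem.Dict.empty, PySem.Dict.empty)
    let cand := cand ++ ei.1.getD "anyone" []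
    let cand := principal.foldl (fun acc pr_tag =>
      if pr_tag != "void" then acc ++ ei.2.getD pr_tag [] else acc) cand
    PySem.Set.ofList cand

-- ===== PRECONDITION & SPEC =====
def Spec_resolve_internal_py (principal : List String) (resource : List (String × String)) (out : List String) : Prop := out = resolve_internal_py_alt principal resource
instance (principal : List String) (resource : List (String × String)) (out : List String) : Decidable (Spec_resolve_internal_py principal resource out) := by unfold Spec_resolve_internal_py; infer_instance

-- ===== CLAIM (what is proved, stated in full; the proofs are below) =====
def Claim_equal_resolve_internal_py : Prop := ∀ (principal : List String) (resource : List (String × String)), Dom_resolve_internal_py principal resource → Spec_resolve_internal_py principal resource (resolve_internal_py principal resource)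

-- ===== LEMMAS AND PROOFS =====

-- String == is List Char == on .toList
theorem pv_beq_toList (s t : String) : (s == t) = (s.toList == t.toList) := by
  by_cases h : s = t
  · subst h; simp
  · have h2 : s.toList ≠ t.toList := fun hc => h (String.toList_inj.mp hc)
    simp [h, h2]

-- among the takes of t of lengths 0..m-1 (m ≤ length+1), exactly one equals c, iff c is a prefix of t
theorem pv_range_filter (t c : List Char) :
    ∀ m, m ≤ t.length + 1 →
      (List.range m).filter (fun k => t.take k == c) =
        if c.length + 1 ≤ m ∧ c <+: t then [c.length] else [] := by
  intro m
  induction m with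
  | zero => intro _; simp
  | succ m ih =>
    intro hm
    rw [List.range_succ, List.filter_append]
    rw [ih (by omega)]
    have hml : m ≤ t.length := by omega
    by_cases hp : t.take m = c
    · have hlen : c.length = m := by
        subst hp; simp [Nat.min_eq_left hml]
      have hpre : c <+: t := hp ▸ List.take_prefix m t
      simp [hp, hlen, hpre]
    · have hfil : (List.filter (fun k => t.take k == c) [m]) = [] := by simp [hp]
      rw [hfil, List.append_nil]
      have hkey : ¬ (c.length = m ∧ c <+: t) := by
        rintro ⟨h1, h2⟩
        exact hp (by rw [← h1]; exact (List.prefix_iff_eq_take.mp h2).symm)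
      by_cases hP : c <+: t
      · have : c.length ≠ m := fun h => hkey ⟨h, hP⟩
        by_cases h3 : c.length + 1 ≤ m
        · rw [if_pos ⟨h3, hP⟩, if_pos ⟨by omega, hP⟩]
        · rw [if_neg (fun h => h3 h.1), if_neg (fun h => absurd h.1 (by omega))]
      · rw [if_neg (fun h => hP h.2), if_neg (fun h => hP h.2)]

-- inserting action a under every prefix of t changes exactly the keys that are prefixes of t, once
theorem pv_inner (t a : String) (d : PySem.Dict String (List String)) (c : String) :
    ((PySem.List.pyRange 0 (PySem.Str.len t + 1) 1).foldl
        (fun d2 k => d2.modify (PySem.Str.slice t none (some k)) [] (· ++ [a])) d).getD c []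
      = d.getD c [] ++ (if PySem.Str.startswith t c then [a] else []) := by
  have hfold :
      (PySem.List.pyRange 0 (PySem.Str.len t + 1) 1).foldl
        (fun d2 k => d2.modify (PySem.Str.slice t none (some k)) [] (· ++ [a])) d
      = ((PySem.List.pyRange 0 (PySem.Str.len t + 1) 1).map
          (fun k => (PySem.Str.slice t none (some k), a))).foldl
          (fun d2 p => d2.modify p.1 [] (· ++ [p.2])) d := by
    rw [List.foldl_map]
  rw [hfold, PySem.Dict.getD_foldl_modify_append, List.filter_map, List.map_map]
  congr 1
  have hrange : PySem.List.pyRange 0 (PySem.Str.len t + 1) 1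
      = (List.range (t.toList.length + 1)).map (fun k => ((k : Nat) : Int)) := by
    rw [PySem.List.pyRange_one]
    simp [PySem.Str.len_eq]
  rw [hrange, List.filter_map, List.map_map]
  simp only [Function.comp_def]
  have hcomp : ∀ k ∈ List.range (t.toList.length + 1),
      ((PySem.Str.slice t none (some ((k:Nat):Int)), a).1 == c)
        = (t.toList.take k == c.toList) := by
    intro k _
    rw [pv_beq_toList]
    congr 1
    have : (PySem.Str.slice t none (some ((k:Nat):Int))).toList
        = PySem.List.slice t.toList none (some ((k:Nat):Int)) := by
      simp [PySem.Str.slice]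
    rw [this, PySem.List.slice_to_natCast]
  rw [List.filter_congr hcomp, pv_range_filter t.toList c.toList (t.toList.length + 1) (le_refl _)]
  rw [PySem.Str.startswith_eq]
  by_cases hp : c.toList <+: t.toList
  · have h1 : PySem.Chars.startswith t.toList c.toList = true := (PySem.Chars.startswith_iff _ _).mpr hp
    have h2 : c.toList.length + 1 ≤ t.toList.length + 1 := by
      have := hp.length_le; omega
    rw [if_pos ⟨h2, hp⟩, h1]
    simp
  · have h1 : PySem.Chars.startswith t.toList c.toList = false := by
      rcases Bool.eq_false_or_eq_true (PySem.Chars.startswith t.toList c.toList) with h | h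
      · exact absurd ((PySem.Chars.startswith_iff _ _).mp h) hp
      · exact h
    rw [if_neg (fun h => hp h.2), h1]
    simp

-- the prefix index answers key c with the actions of resources whose tag starts with c, in order
theorem pv_index (resource : List (String × String)) (d : PySem.Dict String (List String)) (c : String) :
    (resource.foldl (fun d2 p =>
        (PySem.List.pyRange 0 (PySem.Str.len p.1 + 1) 1).foldl
          (fun d3 k => d3.modify (PySem.Str.slice p.1 none (some k)) [] (· ++ [p.2])) d2) d).getD c []
      = d.getD c [] ++ (resource.filter (fun p => PySem.Str.startswith p.1 c)).map (·.2) := by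
  induction resource generalizing d with
  | nil => simp
  | cons p rs ih =>
    rw [List.foldl_cons, ih, pv_inner]
    simp only [PySem.Str.startswith_eq, List.filter_cons]
    by_cases h : PySem.Chars.startswith p.1.toList c.toList = true
    · simp [h]
    · simp [h]

-- a conditional-add fold is an update by the filtered, mapped list
theorem pv_foldl_ifadd {α β : Type} [BEq α] (l : List β) (p : β → Bool) (f : β → α)
    (s : PySem.Set α) :
    l.foldl (fun acc x => if p x then PySem.Set.add acc (f x) else acc) s
      = PySem.Set.update s ((l.filter p).map f) := by
  induction l generalizing s with
  | nil => simp [PySem.Set.update_nil]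
  | cons x xs ih =>
    by_cases h : p x = true
    · simp [List.foldl_cons, h, ih, PySem.Set.update_cons]
    · simp [List.foldl_cons, h, ih]

-- a fold of updates is an update by the flatMap
theorem pv_foldl_update {α β : Type} [BEq α] (l : List β) (g : β → List α) (s : PySem.Set α) :
    l.foldl (fun acc x => PySem.Set.update acc (g x)) s = PySem.Set.update s (l.flatMap g) := by
  induction l generalizing s with
  | nil => simp [PySem.Set.update_nil]
  | cons x xs ih => simp [List.foldl_cons, ih, List.flatMap_cons, PySem.Set.update_append]

-- dedup of a constant list
theorem pv_ofList_const {α β : Type} [BEq α] [LawfulBEq α] (l : List β) (c : α) :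
    PySem.Set.ofList (l.map (fun _ => c)) = if l.isEmpty then [] else [c] := by
  induction l with
  | nil => simp [PySem.Set.ofList_nil]
  | cons x xs ih =>
    simp only [List.map_cons, PySem.Set.ofList_cons, ih, List.isEmpty_cons]
    by_cases h : xs.isEmpty
    · simp [h, PySem.Set.discard]
    · simp [h, PySem.Set.discard]

-- phase 1 of both programs agree
theorem pv_phase1 (principal : List String) :
    principal.foldl (fun acc pr_tag =>
        if pr_tag == "root" then PySem.Set.add acc "all" else acc) PySem.Set.empty
      = PySem.Set.ofList (if principal.contains "root" then ["all"] else []) := by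
  have h := pv_foldl_ifadd principal (fun pr => pr == "root") (fun _ => "all") PySem.Set.empty
  rw [h, PySem.Set.update_empty, pv_ofList_const]
  by_cases hm : "root" ∈ principal
  · have hne : (principal.filter (fun pr => pr == "root")).isEmpty = false := by
      simp only [List.isEmpty_eq_false_iff_exists_mem]
      exact ⟨"root", List.mem_filter.mpr ⟨hm, by simp⟩⟩
    simp [hne]
    rw [if_pos hm]
    decide
  · have hne : (principal.filter (fun pr => pr == "root")).isEmpty = true := by
      simp only [List.isEmpty_iff, List.filter_eq_nil_iff]
      intro a ha hr
      exact hm ((eq_of_beq hr) ▸ ha)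
    simp [hne]
    rw [if_neg hm]
    decide

-- the pair-state fold is the two independent dict builds
theorem pv_pair (rs : List (String × String))
    (d1 d2 : PySem.Dict String (List String)) :
    rs.foldl (fun di p =>
        (di.1.modify p.1 [] (· ++ [p.2]),
         (PySem.List.pyRange 0 (PySem.Str.len p.1 + 1) 1).foldl
           (fun dd k => dd.modify (PySem.Str.slice p.1 none (some k)) [] (· ++ [p.2])) di.2)) (d1, d2)
      = (rs.foldl (fun d p => d.modify p.1 [] (· ++ [p.2])) d1,
         rs.foldl (fun d p =>
           (PySem.List.pyRange 0 (PySem.Str.len p.1 + 1) 1).foldl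
             (fun dd k => dd.modify (PySem.Str.slice p.1 none (some k)) [] (· ++ [p.2])) d) d2) := by
  induction rs generalizing d1 d2 with
  | nil => rfl
  | cons p t ih => simp only [List.foldl_cons, ih]

-- ===== VERDICT (by name: the statement is the Claim_ definition above) =====
theorem resolve_internal_py_spec : Claim_equal_resolve_internal_py := by
  intro principal resource _
  unfold Spec_resolve_internal_py resolve_internal_py resolve_internal_py_alt
  by_cases hr : resource.isEmpty
  · simp only [hr, if_true]
    exact pv_phase1 principal
  · have hr' : resource.isEmpty = false := by simpa using hr
    simp only [hr', Bool.false_eq_true, if_false]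
    -- split B's pair-state fold into the two independent dict builds
    rw [pv_pair]
    -- B's lookups are A's filter lists
    rw [show (resource.foldl (fun d (p : String × String) => PySem.Dict.modify d p.1 [] (· ++ [p.2]))
          PySem.Dict.empty).getD "anyone" []
        = (resource.filter (fun p => p.1 == "anyone")).map (·.2) by
      rw [PySem.Dict.getD_foldl_modify_append]; simp]
    have hlook : (fun (acc : List String) (pr_tag : String) =>
        if pr_tag != "void" then acc ++
            (resource.foldl (fun d2 (p : String × String) =>
              (PySem.List.pyRange 0 (PySem.Str.len p.1 + 1) 1).foldl
                (fun d3 k => d3.modify (PySem.Str.slice p.1 none (some k)) [] (· ++ [p.2])) d2)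
              PySem.Dict.empty).getD pr_tag []
          else acc)
        = (fun (acc : List String) (pr_tag : String) =>
            if pr_tag != "void" then acc ++
              (resource.filter (fun p => PySem.Str.startswith p.1 pr_tag)).map (·.2)
            else acc) := by
      funext acc pr_tag
      rw [pv_index]
      simp
    dsimp only
    rw [hlook]
    have hB : ∀ (init : List String),
        principal.foldl (fun acc pr_tag => if pr_tag != "void" then acc ++
            (resource.filter (fun p => PySem.Str.startswith p.1 pr_tag)).map (·.2) else acc) init
        = init ++ (principal.filter (fun pr => pr != "void")).flatMap
            (fun pr_tag => (resource.filter (fun p => PySem.Str.startswith p.1 pr_tag)).map (·.2)) := by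
      intro init
      rw [PySem.List.foldl_if_eq_foldl_filter, PySem.List.foldl_append_eq_flatMap]
    rw [hB]
    -- A-side: express the three set passes as one ofList of the same candidate list
    have hbody :
        (fun (acc : PySem.Set String) pr_tag =>
          if pr_tag == "void" then acc
          else resource.foldl (fun acc2 p =>
            if PySem.Str.startswith p.1 pr_tag then PySem.Set.add acc2 p.2 else acc2) acc)
        = (fun (acc : PySem.Set String) pr_tag =>
          if pr_tag != "void" then
            PySem.Set.update acc
              ((resource.filter (fun p => PySem.Str.startswith p.1 pr_tag)).map (·.2))
          else acc) := by
      funext acc pr_tag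
      by_cases h : (pr_tag == "void") = true
      · simp [h, bne]
      · have h0 : (pr_tag == "void") = false := by simpa using h
        rw [if_neg (by simp [h0]), if_pos (show (pr_tag != "void") = true by simp [bne, h0])]
        exact pv_foldl_ifadd resource (fun p => PySem.Str.startswith p.1 pr_tag) (·.2) acc
    rw [pv_phase1,
        pv_foldl_ifadd resource (fun p => p.1 == "anyone") (·.2),
        hbody,
        ← List.foldl_filter,
        pv_foldl_update,
        PySem.Set.ofList_append, PySem.Set.ofList_append]
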